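-- pv_equiv track=rewrite | github.com/RjNayak/apache_airflow_datapipeline | test.py | get_duplicated
-- ===== SOURCE A (Python) =====
-- def get_duplicated(l):
--     num_dict = {}
--     result = None
--
--     for x in l:
--         num_dict[x] = num_dict.get(x, 0)+1
--
--     for key, val in num_dict.items():
--         if val > 1:
--             result = key
--
--     return result
-- ===== SOURCE B (Python) =====
-- def get_duplicated(l):
--     # Simpler: scan the distinct elements in reverse first-occurrence order,
--     # return the first that occurs more than once.
--     for x in reversed(list(dict.fromkeys(l))):
--         if l.count(x) > 1:
--             return x
--     return None
-- ===== Notes on version B (the rewrite author's own statement) =====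
-- stated objective: simpler
-- what changed: Replaces A's counting-dict build plus full forward scan over items (keeping the last duplicate) with a reverse scan over the ordered-dedup of l that returns the first element with count > 1.
import Mathlib
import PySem

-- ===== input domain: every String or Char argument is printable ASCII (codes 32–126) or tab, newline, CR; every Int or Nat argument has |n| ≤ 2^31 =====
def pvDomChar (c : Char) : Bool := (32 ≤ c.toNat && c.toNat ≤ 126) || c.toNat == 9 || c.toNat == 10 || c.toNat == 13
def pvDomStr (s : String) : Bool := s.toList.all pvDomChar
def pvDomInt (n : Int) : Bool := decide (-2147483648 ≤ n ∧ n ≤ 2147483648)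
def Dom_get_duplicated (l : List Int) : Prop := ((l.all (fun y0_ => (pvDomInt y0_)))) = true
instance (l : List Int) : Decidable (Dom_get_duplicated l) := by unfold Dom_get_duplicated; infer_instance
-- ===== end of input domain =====

-- B replaces A's counting-dict build plus forward item scan (keeping the last duplicate)
-- with a reverse scan over the ordered dedup of l returning the first element with count > 1 (objective: simpler).


-- ===== PORT A =====
def get_duplicated (l : List Int) : Option Int :=
  let num_dict := l.foldl (fun (d : PySem.Dict Int Int) x => d.insert x (d.getD x 0 + 1)) PySem.Dict.empty
  num_dict.items.foldl (fun (r : Option Int) p => if p.2 > 1 then some p.1 else r) none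

-- ===== PORT B =====
def get_duplicated_alt (l : List Int) : Option Int :=
  (PySem.List.dedup l).reverse.find? (fun x => decide ((1 : Int) < PySem.List.count l x))

-- ===== PRECONDITION & SPEC =====
def Spec_get_duplicated (l : List Int) (out : Option Int) : Prop := out = get_duplicated_alt l
instance (l : List Int) (out : Option Int) : Decidable (Spec_get_duplicated l out) := by unfold Spec_get_duplicated; infer_instance

-- ===== CLAIM (what is proved, stated in full; the proofs are below) =====
def Claim_equal_get_duplicated : Prop := ∀ (l : List Int), Dom_get_duplicated l → Spec_get_duplicated l (get_duplicated l)

-- ===== LEMMAS AND PROOFS =====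

-- A's 'keep the last item with val > 1' loop is the first match over the reversed list.
theorem foldl_last_if_gt_one (ps : List (Int × Int)) (r0 : Option Int) :
    ps.foldl (fun (r : Option Int) p => if p.2 > 1 then some p.1 else r) r0
      = ((ps.reverse.find? (fun p => decide ((1 : Int) < p.2))).map Prod.fst).or r0 := by
  induction ps generalizing r0 with
  | nil => simp
  | cons p t ih =>
    simp only [List.foldl_cons, List.reverse_cons, List.find?_append, ih]
    cases h : t.reverse.find? (fun p => decide ((1 : Int) < p.2)) with
    | some q => simp [Option.or]
    | none =>
      simp only [Option.map_none, List.find?_singleton]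
      by_cases hp : (1 : Int) < p.2 <;> simp [hp, Option.or]

theorem get_duplicated_spec : Claim_equal_get_duplicated := by
  intro l _
  unfold Spec_get_duplicated get_duplicated get_duplicated_alt
  rw [PySem.Dict.foldl_insert_getD_add_one_eq_counter]
  show (PySem.Dict.counter l).items.foldl (fun (r : Option Int) p => if p.2 > 1 then some p.1 else r) none = _
  rw [PySem.Dict.items_counter, foldl_last_if_gt_one]
  rw [← List.map_reverse, List.find?_map, Option.map_map]
  simp [← PySem.List.dedup_eq_ofList, PySem.List.count_eq, Function.comp_def, Nat.one_lt_cast]
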